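-- pv_equiv track=rewrite | github.com/Ajitkumar04/temperature_assiment | grad_analyzed/grade_analyzer.py | classify_grades
-- ===== SOURCE A (Python) =====
-- def classify_grades(averages):
--   final_result={}
--   for name,avg in averages.items():
--     if avg>=90:
--       grade="A"
--     elif avg>=75:
--       grade="B"
--     elif avg>=60:
--       grade="C"
--     else:
--       grade="F"
--     final_result[name]=(avg,grade)
--   return final_result
-- ===== SOURCE B (Python) =====
-- def classify_grades(averages):
--     bounds = [60, 75, 90]
--     grades = ["F", "C", "B", "A"]
--
--     def bisect_right(a, x):
--         # hand-written binary search (stdlib bisect not imported by the module)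
--         lo, hi = 0, len(a)
--         while lo < hi:
--             mid = (lo + hi) // 2
--             if x < a[mid]:
--                 hi = mid
--             else:
--                 lo = mid + 1
--         return lo
--
--     return {name: (avg, grades[bisect_right(bounds, avg)])
--             for name, avg in averages.items()}
-- ===== Notes on version B (the rewrite author's own statement) =====
-- stated objective: alternative
-- what changed: Replaces the four-way if/elif cascade by a binary search (hand-written bisect_right) over a sorted table of the grade boundaries 60, 75 and 90 indexing a grade list, and the explicit dict-building loop by a dict comprehension.
import Mathlib
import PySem

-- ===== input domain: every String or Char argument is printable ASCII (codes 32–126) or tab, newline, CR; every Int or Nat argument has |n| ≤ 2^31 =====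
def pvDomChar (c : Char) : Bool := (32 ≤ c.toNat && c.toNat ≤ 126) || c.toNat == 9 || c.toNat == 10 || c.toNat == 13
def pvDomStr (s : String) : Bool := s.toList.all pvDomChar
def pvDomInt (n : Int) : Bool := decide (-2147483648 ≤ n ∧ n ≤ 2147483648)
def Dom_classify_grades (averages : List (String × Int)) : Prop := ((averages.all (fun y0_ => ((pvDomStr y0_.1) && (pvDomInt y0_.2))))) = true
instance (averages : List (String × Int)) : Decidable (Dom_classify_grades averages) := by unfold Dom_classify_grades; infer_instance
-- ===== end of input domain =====

-- B replaces A's elif cascade by a binary search (hand-written bisect_right) over a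
-- sorted boundary table indexing a grade list, and A's insert loop by a dict
-- comprehension; objective: alternative decision structure, same cost.

-- ===== PORT A =====
-- for name,avg in averages.items(): if/elif cascade chooses grade; final_result[name]=(avg,grade)
def classify_grades (averages : List (String × Int)) : List (String × Int × String) :=
  (averages.foldl
    (fun (final_result : PySem.Dict String (Int × String)) p =>
      let grade : String :=
        if p.2 ≥ 90 then "A"
        else if p.2 ≥ 75 then "B"
        else if p.2 ≥ 60 then "C"
        else "F"
      final_result.insert p.1 (p.2, grade))
    PySem.Dict.empty).items

-- ===== PORT B =====
-- bounds=[60,75,90]; grades=["F","C","B","A"]; hand-written bisect_right while-loop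
def pvBounds : List Int := [60, 75, 90]
def pvGradesTable : List String := ["F", "C", "B", "A"]

-- the while lo<hi loop of Source B's bisect_right, as recursion on hi-lo
def pvBisectRight (a : List Int) (x : Int) (lo hi : Nat) : Nat :=
  if _h : lo < hi then
    let mid := (lo + hi) / 2
    if x < a.getD mid 0 then pvBisectRight a x lo mid
    else pvBisectRight a x (mid + 1) hi
  else lo
termination_by hi - lo
decreasing_by all_goals omega

-- {name: (avg, grades[bisect_right(bounds, avg)]) for name,avg in averages.items()}
-- the index is always 0..3, so pyGetD's default is never hit.
def classify_grades_alt (averages : List (String × Int)) : List (String × Int × String) :=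
  ((PySem.Dict.ofList averages).items.foldl
    (fun (d : PySem.Dict String (Int × String)) p =>
      d.insert p.1 (p.2,
        PySem.List.pyGetD pvGradesTable (Int.ofNat (pvBisectRight pvBounds p.2 0 pvBounds.length)) ""))
    PySem.Dict.empty).items

-- ===== PRECONDITION & SPEC =====
def Spec_classify_grades (averages : List (String × Int)) (out : List (String × Int × String)) : Prop := out = classify_grades_alt averages
instance (averages : List (String × Int)) (out : List (String × Int × String)) : Decidable (Spec_classify_grades averages out) := by unfold Spec_classify_grades; infer_instance

-- ===== CLAIM (what is proved, stated in full; the proofs are below) =====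
def Claim_equal_classify_grades : Prop := ∀ (averages : List (String × Int)), Dom_classify_grades averages → Spec_classify_grades averages (classify_grades averages)

-- ===== LEMMAS AND PROOFS =====

-- A's grade (elif cascade) for avg
def pvGradeA (a : Int) : String :=
  if a ≥ 90 then "A" else if a ≥ 75 then "B" else if a ≥ 60 then "C" else "F"

-- B's grade (binary search into the grade table) for avg
def pvGradeB (a : Int) : String :=
  PySem.List.pyGetD pvGradesTable (Int.ofNat (pvBisectRight pvBounds a 0 pvBounds.length)) ""

-- the binary search stops immediately when lo = hi
lemma pv_bisect_self (l : List Int) (x : Int) (lo : Nat) : pvBisectRight l x lo lo = lo := by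
  unfold pvBisectRight; simp

-- the two grade computations agree on every avg
lemma pv_grade_eq (a : Int) : pvGradeA a = pvGradeB a := by
  unfold pvGradeA pvGradeB
  by_cases h90 : a ≥ 90
  · rw [show pvBisectRight pvBounds a 0 pvBounds.length = 3 by
      unfold pvBisectRight; unfold pvBisectRight
      simp [pvBounds, pv_bisect_self, show ¬ a < 75 by omega, show ¬ a < 90 by omega]]
    simp [h90, pvGradesTable, PySem.List.pyGetD, PySem.List.pyGet?, PySem.List.pyIdx?]
  · by_cases h75 : a ≥ 75
    · rw [show pvBisectRight pvBounds a 0 pvBounds.length = 2 by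
        unfold pvBisectRight; unfold pvBisectRight
        simp [pvBounds, pv_bisect_self, show ¬ a < 75 by omega, show a < 90 by omega]]
      simp [h90, h75, pvGradesTable, PySem.List.pyGetD, PySem.List.pyGet?, PySem.List.pyIdx?]
    · by_cases h60 : a ≥ 60
      · rw [show pvBisectRight pvBounds a 0 pvBounds.length = 1 by
          unfold pvBisectRight; unfold pvBisectRight
          simp [pvBounds, pv_bisect_self, show a < 75 by omega, show ¬ a < 60 by omega]]
        simp [h90, h75, h60, pvGradesTable, PySem.List.pyGetD, PySem.List.pyGet?, PySem.List.pyIdx?]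
      · rw [show pvBisectRight pvBounds a 0 pvBounds.length = 0 by
          unfold pvBisectRight; unfold pvBisectRight
          simp [pvBounds, pv_bisect_self, show a < 75 by omega, show a < 60 by omega]]
        simp [h90, h75, h60, pvGradesTable, PySem.List.pyGetD, PySem.List.pyGet?, PySem.List.pyIdx?]

-- the same insert loop with pointwise-equal grade functions gives the same dict
lemma pv_fold_congr (f g : Int → String) (hfg : ∀ a, f a = g a)
    (l : List (String × Int)) (d : PySem.Dict String (Int × String)) :
    l.foldl (fun r p => r.insert p.1 (p.2, f p.2)) d
      = l.foldl (fun r p => r.insert p.1 (p.2, g p.2)) d := by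
  induction l generalizing d with
  | nil => rfl
  | cons p t ih => simp only [List.foldl_cons, hfg p.2, ih]

-- one grading insert mirrors one raw insert through the value map
lemma pv_insert_map (f : Int → String) (d : PySem.Dict String Int) (k : String) (v : Int) :
    (PySem.Dict.mk (d.items.map (fun p => (p.1, (p.2, f p.2))))).insert k (v, f v)
      = PySem.Dict.mk ((d.insert k v).items.map (fun p => (p.1, (p.2, f p.2)))) := by
  apply PySem.Dict.ext
  have hc : (PySem.Dict.mk (d.items.map (fun p => (p.1, (p.2, f p.2))))).contains k = d.contains k := by
    rw [PySem.Dict.contains_eq_decide_mem_keys, PySem.Dict.contains_eq_decide_mem_keys]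
    simp [PySem.Dict.keys]
  rw [PySem.Dict.items_insert, PySem.Dict.items_insert, hc]
  by_cases h : d.contains k = true
  · simp only [h, if_true, List.map_map]
    apply List.map_congr_left
    intro p hp
    by_cases hk : p.1 == k <;> simp [Function.comp, hk]
  · simp [h]

-- the grading insert loop is the raw insert loop with grades mapped over the items
lemma pv_fold_map (f : Int → String) (l : List (String × Int)) (d : PySem.Dict String Int) :
    l.foldl (fun r p => r.insert p.1 (p.2, f p.2)) (PySem.Dict.mk (d.items.map (fun p => (p.1, (p.2, f p.2)))))
      = PySem.Dict.mk ((l.foldl (fun d p => d.insert p.1 p.2) d).items.map (fun p => (p.1, (p.2, f p.2)))) := by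
  induction l generalizing d with
  | nil => rfl
  | cons p t ih =>
      simp only [List.foldl_cons]
      rw [pv_insert_map f d p.1 p.2, ih]

-- building a dict from an association list whose keys are already distinct keeps it as is
lemma pv_ofList_nodup (xs : List (String × Int)) (h : (xs.map (fun p => p.1)).Nodup) :
    PySem.Dict.ofList xs = PySem.Dict.mk xs := by
  apply PySem.Dict.ext
  show (xs.foldl (fun d p => d.insert p.1 p.2) PySem.Dict.empty).items = xs
  exact (PySem.Dict.items_foldl_insert_fresh xs (fun p => p.1) (fun p => p.2)
    PySem.Dict.empty (fun a _ => rfl) h).trans (by simp [PySem.Dict.empty])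

-- running the grading loop over the deduplicated items of ofList l equals running it over l
-- (a later duplicate pair overwrites in place either way)
lemma pv_fold_ofList (f : Int → String) (l : List (String × Int)) :
    (PySem.Dict.ofList l).items.foldl (fun r p => r.insert p.1 (p.2, f p.2)) PySem.Dict.empty
      = l.foldl (fun r p => r.insert p.1 (p.2, f p.2)) PySem.Dict.empty := by
  have h1 := pv_fold_map f l PySem.Dict.empty
  have h2 := pv_fold_map f (PySem.Dict.ofList l).items PySem.Dict.empty
  have h3 : PySem.Dict.ofList ((PySem.Dict.ofList l).items) = PySem.Dict.mk ((PySem.Dict.ofList l).items) := by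
    apply pv_ofList_nodup
    have := PySem.Dict.nodup_keys_ofList (κ := String) (ν := Int) l
    simpa [PySem.Dict.keys] using this
  have h4 : PySem.Dict.mk (((PySem.Dict.ofList ((PySem.Dict.ofList l).items)).items).map (fun p => (p.1, (p.2, f p.2))))
      = PySem.Dict.mk (((PySem.Dict.ofList l).items).map (fun p => (p.1, (p.2, f p.2)))) := by rw [h3]
  exact h2.trans (h4.trans h1.symm)

-- ===== VERDICT (by name: the statement is the Claim_ definition above) =====
theorem classify_grades_spec : Claim_equal_classify_grades := by
  intro averages _
  show classify_grades averages = classify_grades_alt averages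
  show ((averages.foldl (fun r p => r.insert p.1 (p.2, pvGradeA p.2)) PySem.Dict.empty).items
      : List (String × Int × String))
    = ((PySem.Dict.ofList averages).items.foldl (fun r p => r.insert p.1 (p.2, pvGradeB p.2)) PySem.Dict.empty).items
  rw [pv_fold_ofList pvGradeB averages, pv_fold_congr pvGradeA pvGradeB pv_grade_eq]
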